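-- pv_equiv track=rewrite | github.com/kjnh10/pcw | work/atcoder/abc/abc092/C/answers/257583_yurutechdon.py | calc
-- ===== SOURCE A (Python) =====
-- def calc(N, A, i):
--     x = 0
--     r = 0
--     for j, a in enumerate(A):
--         if j == i:
--             continue
--         r += abs(x - a)
--         x = a
--     r += abs(x)
--     return r
-- ===== SOURCE B (Python) =====
-- def calc(N, A, i):
--     # Subtract-and-patch: take the full tour over all of A (with 0 at both ends),
--     # then splice out stop i in O(1) by replacing the two edges around it with one.
--     path = [0] + A + [0]
--     full = sum(abs(p - q) for p, q in zip(path, path[1:]))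
--     n = len(A)
--     if 0 <= i < n:
--         prev, cur, nxt = path[i], path[i + 1], path[i + 2]
--         return full - abs(prev - cur) - abs(cur - nxt) + abs(prev - nxt)
--     return full
-- ===== Notes on version B (the rewrite author's own statement) =====
-- stated objective: alternative
-- what changed: Instead of summing the skipped path directly, B computes the full tour cost over all of A with 0 sentinels and then removes stop i by an O(1) patch: subtract the two edges incident to A[i] and add the single edge joining its neighbours.
import Mathlib
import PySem

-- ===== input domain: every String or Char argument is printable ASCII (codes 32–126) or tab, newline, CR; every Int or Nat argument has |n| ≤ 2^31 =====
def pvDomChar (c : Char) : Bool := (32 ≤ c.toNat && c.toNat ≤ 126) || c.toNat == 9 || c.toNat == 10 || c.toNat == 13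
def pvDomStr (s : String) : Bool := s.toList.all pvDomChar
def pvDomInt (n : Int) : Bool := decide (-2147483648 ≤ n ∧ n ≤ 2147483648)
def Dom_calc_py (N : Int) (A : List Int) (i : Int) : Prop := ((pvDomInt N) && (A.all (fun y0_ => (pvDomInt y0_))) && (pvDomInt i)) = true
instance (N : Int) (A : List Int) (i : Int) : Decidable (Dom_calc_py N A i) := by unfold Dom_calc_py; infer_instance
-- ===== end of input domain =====

-- B computes the full tour cost over all of A (0 sentinels) and removes stop i by an
-- O(1) patch on the two edges around it, instead of A's pass that skips index i (objective: alternative).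

-- ===== PORT A =====
def calc_py (N : Int) (A : List Int) (i : Int) : Int :=
  -- x = 0; r = 0; for j, a in enumerate(A): if j == i: continue; r += abs(x - a); x = a
  let st := (PySem.List.enumerate A).foldl
    (fun (s : Int × Int) ja => if ja.1 = i then s else (ja.2, s.2 + |s.1 - ja.2|)) (0, 0)
  -- r += abs(x); return r
  st.2 + |st.1|

-- ===== PORT B =====
def calc_py_alt (N : Int) (A : List Int) (i : Int) : Int :=
  -- path = [0] + A + [0]
  let path : List Int := 0 :: A ++ [0]
  -- full = sum(abs(p - q) for p, q in zip(path, path[1:]))   -- path[1:] = drop 1 (exact)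
  let full := ((path.zip (path.drop 1)).map (fun pq => |pq.1 - pq.2|)).sum
  let n : Int := A.length
  if 0 ≤ i ∧ i < n then
    -- prev, cur, nxt = path[i], path[i+1], path[i+2]   -- all in range, so pyGet? is some
    let prev := (PySem.List.pyGet? path i).getD 0
    let cur := (PySem.List.pyGet? path (i + 1)).getD 0
    let nxt := (PySem.List.pyGet? path (i + 2)).getD 0
    full - |prev - cur| - |cur - nxt| + |prev - nxt|
  else
    full

-- ===== PRECONDITION & SPEC =====
def Spec_calc_py (N : Int) (A : List Int) (i : Int) (out : Int) : Prop := out = calc_py_alt N A i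
instance (N : Int) (A : List Int) (i : Int) (out : Int) : Decidable (Spec_calc_py N A i out) := by unfold Spec_calc_py; infer_instance

-- ===== CLAIM (what is proved, stated in full; the proofs are below) =====
def Claim_equal_calc_py : Prop := ∀ (N : Int) (A : List Int) (i : Int), Dom_calc_py N A i → Spec_calc_py N A i (calc_py N A i)

-- ===== LEMMAS AND PROOFS =====

-- pairwise |difference| sum, the common reference for both sides
def pvPairSum (xs : List Int) : Int :=
  ((xs.zip (xs.drop 1)).map (fun pq => |pq.1 - pq.2|)).sum

theorem pvPairSum_cons_cons (a b : Int) (xs : List Int) :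
    pvPairSum (a :: b :: xs) = |a - b| + pvPairSum (b :: xs) := by
  simp [pvPairSum]

-- A's skip-fold equals the plain fold over the values surviving the filter
theorem pv_foldl_skip (l : List (Int × Int)) (i : Int) (s : Int × Int) :
    l.foldl (fun (s : Int × Int) ja => if ja.1 = i then s else (ja.2, s.2 + |s.1 - ja.2|)) s
      = ((l.filter (fun ja => ja.1 ≠ i)).map (·.2)).foldl
          (fun (s : Int × Int) a => (a, s.2 + |s.1 - a|)) s := by
  induction l generalizing s with
  | nil => rfl
  | cons p l ih =>
      by_cases h : p.1 = i <;> simp [List.foldl_cons, h, ih]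

-- closing the plain fold with |x| equals the pairwise sum over the 0-sentinel path
theorem pv_fold_pairSum (L : List Int) (x r : Int) :
    (L.foldl (fun (s : Int × Int) a => (a, s.2 + |s.1 - a|)) (x, r)).2
      + |(L.foldl (fun (s : Int × Int) a => (a, s.2 + |s.1 - a|)) (x, r)).1|
      = r + pvPairSum (x :: L ++ [0]) := by
  induction L generalizing x r with
  | nil => simp [pvPairSum]
  | cons a L ih =>
      have := ih a (r + |x - a|)
      simp only [List.foldl_cons] at *
      rw [this]
      have h2 : pvPairSum (x :: (a :: L) ++ [0]) = |x - a| + pvPairSum (a :: L ++ [0]) := by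
        simpa using pvPairSum_cons_cons x a (L ++ [0])
      rw [h2]; ring

-- with no surviving index equal to i, the filter keeps everything
theorem pv_filter_all (A : List Int) (i : Int) (h : i < 0 ∨ (A.length : Int) ≤ i) :
    (((PySem.List.enumerate A).filter (fun ja => ja.1 ≠ i)).map (·.2)) = A := by
  have : ∀ ja ∈ PySem.List.enumerate A, ja.1 ≠ i := by
    intro ja hja
    obtain ⟨k, hk, rfl⟩ := (PySem.List.mem_enumerate_iff _ _ _).mp hja
    simp only [] at h ⊢
    omega
  rw [List.filter_eq_self.mpr (by intro a ha; simpa using this a ha)]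
  exact PySem.List.map_snd_enumerate A 0

-- generalized over the enumerate start
theorem pv_filter_skip_aux (A : List Int) (s : Int) (k : Nat) :
    (((PySem.List.enumerate A s).filter (fun ja => ja.1 ≠ s + k)).map (·.2))
      = A.take k ++ A.drop (k + 1) := by
  induction A generalizing s k with
  | nil => simp [PySem.List.enumerate_nil]
  | cons a A ih =>
      cases k with
      | zero =>
          have hall : ∀ ja ∈ PySem.List.enumerate A (s + 1), ja.1 ≠ s + (0 : Nat) := by
            intro ja hja
            obtain ⟨m, hm, rfl⟩ := (PySem.List.mem_enumerate_iff _ _ _).mp hja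
            simp only []
            omega
          simp only [PySem.List.enumerate_cons, List.filter_cons]
          rw [if_neg (by simp)]
          rw [List.filter_eq_self.mpr (by intro p hp; simpa using hall p hp)]
          simpa using PySem.List.map_snd_enumerate A (s + 1)
      | succ k =>
          simp only [PySem.List.enumerate_cons, List.filter_cons]
          rw [if_pos (by simp; omega)]
          have hcast : s + ((k + 1 : Nat) : Int) = (s + 1) + (k : Int) := by
            push_cast; ring
          rw [hcast]
          have := ih (s + 1) k
          simp only [List.map_cons, List.take_succ_cons, List.drop_succ_cons,
            List.cons_append]
          rw [this]

-- for in-range i, the surviving values are take k ++ drop (k+1)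
theorem pv_filter_skip (A : List Int) (k : Nat) :
    (((PySem.List.enumerate A).filter (fun ja => ja.1 ≠ (k : Int))).map (·.2))
      = A.take k ++ A.drop (k + 1) := by
  have h := pv_filter_skip_aux A 0 k
  simpa using h

-- splicing element k out of the 0-sentinel path changes the pairwise sum by the patch terms
theorem pv_splice (A : List Int) (k : Nat) (hk : k < A.length) (x : Int) :
    pvPairSum (x :: A ++ [0])
      = pvPairSum (x :: (A.take k ++ A.drop (k + 1)) ++ [0])
        + |(x :: A ++ [0]).getD k 0 - (x :: A ++ [0]).getD (k + 1) 0|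
        + |(x :: A ++ [0]).getD (k + 1) 0 - (x :: A ++ [0]).getD (k + 2) 0|
        - |(x :: A ++ [0]).getD k 0 - (x :: A ++ [0]).getD (k + 2) 0| := by
  induction A generalizing k x with
  | nil => simp at hk
  | cons a A ih =>
      cases k with
      | zero =>
          cases A with
          | nil => simp [pvPairSum]; ring
          | cons b A =>
              simp only [List.cons_append, List.take, List.drop, List.nil_append,
                List.getD]
              rw [pvPairSum_cons_cons x a, pvPairSum_cons_cons a b,
                pvPairSum_cons_cons x b]
              simp
              ring
      | succ k =>
          have hk' : k < A.length := by simpa using hk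
          have := ih k hk' a
          simp only [List.cons_append, List.take, List.drop, List.getD_cons_succ] at *
          rw [pvPairSum_cons_cons x a, pvPairSum_cons_cons x a, this]
          ring

-- ===== VERDICT (by name: the statement is the Claim_ definition above) =====
theorem calc_py_spec : Claim_equal_calc_py := by
  intro N A i _
  unfold Spec_calc_py calc_py calc_py_alt
  rw [pv_foldl_skip]
  simp only []
  by_cases h : 0 ≤ i ∧ i < (A.length : Int)
  · rw [if_pos h]
    obtain ⟨h0, h1⟩ := h
    set k := i.toNat with hkdef
    have hik : i = (k : Int) := by omega
    have hkA : k < A.length := by omega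
    have hfil := pv_filter_skip A k
    rw [hik, hfil]
    have hfold := pv_fold_pairSum (A.take k ++ A.drop (k + 1)) 0 0
    rw [hfold]
    have hsp := pv_splice A k hkA 0
    have hget : ∀ (m : Nat), ((PySem.List.pyGet? ((0 : Int) :: A ++ [0]) (m : Int)).getD 0)
        = ((0 : Int) :: A ++ [0]).getD m 0 := by
      intro m
      rw [PySem.List.pyGet?_natCast]
      simp [List.getD_eq_getElem?_getD]
    have e1 : i = ((k : Nat) : Int) := hik
    rw [show ((k : Int) + 1) = ((k + 1 : Nat) : Int) by push_cast; ring,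
        show ((k : Int) + 2) = ((k + 2 : Nat) : Int) by push_cast; ring,
        hget k, hget (k + 1), hget (k + 2)]
    simp only [pvPairSum, zero_add] at hsp hfold ⊢
    omega
  · rw [if_neg h]
    have hna : i < 0 ∨ (A.length : Int) ≤ i := by omega
    rw [pv_filter_all A i hna]
    have := pv_fold_pairSum A 0 0
    simpa [pvPairSum] using this
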